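-- pv_equiv track=rewrite | github.com/bssrdf/pyleet | MaximumDeletionsonaString.py | deleteString2
-- ===== SOURCE A (Python) =====
-- from functools import lru_cache
--
-- def deleteString2(s: str) -> int:
--     if (len(set(s)) == 1): return len(s)
--     def partialMatchTable(P):
--         n = len(P)
--         pt = [0]*n
--         k = 0
--         for q in range(1,n): # start matching at index 1, no need to match itself
--             while k > 0 and P[k] != P[q]:
--                 k = pt[k-1] # note the difference from CLRS text which has k = pt[k]
--             if P[k] == P[q]:
--                 k += 1
--             pt[q] = k
--         return pt
--     @lru_cache(None)
--     def dfs(s):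
--         ret = 1
--         pt = partialMatchTable(s)
--         for i in range(1,len(s),2):
--             if pt[i] == (i+1)//2:
--                 ret = max(ret, dfs(s[pt[i]:]) + 1)
--         return ret
--     return dfs(s)
-- ===== SOURCE B (Python) =====
-- def _failure(p):
--     n = len(p)
--     pt = [0] * n
--     k = 0
--     for q in range(1, n):
--         while k > 0 and p[k] != p[q]:
--             k = pt[k - 1]
--         if p[k] == p[q]:
--             k += 1
--         pt[q] = k
--     return pt
--
-- def deleteString2(s: str) -> int:
--     n = len(s)
--     dp = [1]  # dp[j] = answer for the suffix of length m - j; starts with just the empty suffix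
--     for m in range(1, n + 1):
--         pt = _failure(s[n - m:])
--         best = 1
--         for k in range(1, m // 2 + 1):
--             if pt[2 * k - 1] == k:
--                 best = max(best, dp[k - 1] + 1)
--         dp.insert(0, best)
--     return dp[0]
-- ===== Notes on version B (the rewrite author's own statement) =====
-- stated objective: alternative
-- what changed: Replaces the lru_cache-memoized recursion on string slices by an explicit bottom-up DP that iterates over suffix lengths and builds the list of suffix answers back-to-front (cons onto the front), with the same KMP failure-table test per suffix; the all-equal-characters shortcut of A is dropped since the DP already yields len(s) there.
import Mathlib
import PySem

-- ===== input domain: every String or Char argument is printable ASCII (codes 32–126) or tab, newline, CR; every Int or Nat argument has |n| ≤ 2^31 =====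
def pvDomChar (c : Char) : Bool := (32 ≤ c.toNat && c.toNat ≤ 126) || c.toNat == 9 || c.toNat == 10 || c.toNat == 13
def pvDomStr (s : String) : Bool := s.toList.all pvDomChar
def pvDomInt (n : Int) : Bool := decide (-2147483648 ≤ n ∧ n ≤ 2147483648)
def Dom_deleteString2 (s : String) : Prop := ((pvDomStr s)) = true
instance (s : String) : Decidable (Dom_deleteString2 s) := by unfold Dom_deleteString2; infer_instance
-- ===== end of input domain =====

-- B replaces the memoized recursion on string slices by an explicit bottom-up DP over suffix
-- lengths, building the answers as a cons-list back-to-front (objective: alternative).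

-- ===== PORT A =====
-- KMP failure table, shared verbatim by both ports (Source A's partialMatchTable = Source B's _failure).
-- The inner 'while k > 0 and P[k] != P[q]: k = pt[k-1]' is ported with a fuel guard (fuel = n);
-- k strictly decreases each iteration, so fuel n is never exhausted on real runs.
def ptWhile (P : List Char) (pt : List Nat) (q : Nat) : Nat → Nat → Nat
  | 0, k => k
  | fuel+1, k =>
    if 0 < k ∧ P.getD k ' ' ≠ P.getD q ' ' then ptWhile P pt q fuel (pt.getD (k-1) 0)
    else k

def pmt (P : List Char) : List Nat :=
  let n := P.length
  let st := (List.range' 1 (n-1)).foldl (fun (st : List Nat × Nat) q =>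
      let k := ptWhile P st.1 q n st.2
      let k := if P.getD k ' ' = P.getD q ' ' then k + 1 else k
      (st.1.set q k, k)) (List.replicate n 0, 0)
  st.1

-- dfs of A, with a fuel guard for termination (each recursive call drops a nonempty prefix,
-- so fuel = length + 1 is never exhausted).
def dfsA : Nat → List Char → Int
  | 0, _ => 1
  | fuel+1, t =>
    let pt := pmt t
    (List.range' 1 (t.length / 2) 2).foldl
      (fun ret i =>
        if pt.getD i 0 = (i + 1) / 2 then max ret (dfsA fuel (t.drop (pt.getD i 0)) + 1)
        else ret) 1

def deleteString2 (s : String) : Int :=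
  let cs := s.toList
  if (PySem.Set.ofList cs).length = 1 then (cs.length : Int)
  else dfsA (cs.length + 1) cs

-- ===== PORT B =====
def deleteString2_alt (s : String) : Int :=
  let cs := s.toList
  let n := cs.length
  let dp := (List.range' 1 n).foldl (fun (dp : List Int) m =>
      let pt := pmt (cs.drop (n - m))
      let best := (List.range' 1 (m / 2)).foldl
        (fun best k =>
          if pt.getD (2 * k - 1) 0 = k then max best (dp.getD (k - 1) 1 + 1) else best)
        (1 : Int)
      best :: dp) [1]
  dp.getD 0 1

-- ===== PRECONDITION & SPEC =====
def Spec_deleteString2 (s : String) (out : Int) : Prop := out = deleteString2_alt s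
instance (s : String) (out : Int) : Decidable (Spec_deleteString2 s out) := by unfold Spec_deleteString2; infer_instance

-- ===== CLAIM (what is proved, stated in full; the proofs are below) =====
def Claim_equal_deleteString2 : Prop := ∀ (s : String), Dom_deleteString2 s → Spec_deleteString2 s (deleteString2 s)

-- ===== LEMMAS AND PROOFS =====

-- the canonical value: dfs with adequate fuel
def dA (t : List Char) : Int := dfsA (t.length + 1) t

lemma dfsA_fuel : ∀ (f1 f2 : Nat) (t : List Char), t.length < f1 → t.length < f2 →
    dfsA f1 t = dfsA f2 t := by
  intro f1
  induction f1 with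
  | zero => intro f2 t h1 h2; omega
  | succ f1 ih =>
    intro f2 t h1 h2
    match f2, h2 with
    | f2 + 1, h2 =>
      simp only [dfsA]
      apply PySem.List.foldl_congr_mem
      intro acc i hi
      rw [List.mem_range'] at hi
      obtain ⟨j, hj, rfl⟩ := hi
      by_cases h : (pmt t).getD (1 + 2 * j) 0 = (1 + 2 * j + 1) / 2
      · rw [if_pos h, if_pos h, h,
          ih f2 (t.drop ((1 + 2 * j + 1) / 2)) (by simp; omega) (by simp; omega)]
      · rw [if_neg h, if_neg h]

lemma range'_two_eq_map (c : Nat) :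
    List.range' 1 c 2 = (List.range' 1 c).map (fun k => 2 * k - 1) := by
  apply List.ext_getElem
  · simp
  · intro i h1 h2
    simp [List.getElem_range']
    omega

lemma dA_unfold (t : List Char) :
    dA t = (List.range' 1 (t.length / 2)).foldl
      (fun ret k =>
        if (pmt t).getD (2 * k - 1) 0 = k then max ret (dA (t.drop k) + 1) else ret) 1 := by
  show dfsA (t.length + 1) t = _
  simp only [dfsA]
  rw [range'_two_eq_map, List.foldl_map]
  apply PySem.List.foldl_congr_mem
  intro acc k hk
  rw [List.mem_range'] at hk
  obtain ⟨j, hj, rfl⟩ := hk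
  have hc : (2 * (1 + 1 * j) - 1 + 1) / 2 = 1 + 1 * j := by omega
  rw [hc]
  by_cases h : (pmt t).getD (2 * (1 + 1 * j) - 1) 0 = 1 + 1 * j
  · rw [if_pos h, if_pos h, h]
    unfold dA
    rw [dfsA_fuel t.length ((t.drop (1 + 1 * j)).length + 1) (t.drop (1 + 1 * j))
      (by simp; omega) (by omega)]
  · rw [if_neg h, if_neg h]

lemma foldl_le {α : Type} (f : Int → α → Int) (B : Int) :
    ∀ (l : List α) (a : Int), (∀ a' x, x ∈ l → a' ≤ B → f a' x ≤ B) → a ≤ B →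
      l.foldl f a ≤ B := by
  intro l
  induction l with
  | nil => intro a _ ha; simpa using ha
  | cons x xs ih =>
    intro a h ha
    exact ih _ (fun a' y hy => h a' y (List.mem_cons_of_mem _ hy))
      (h a x (List.mem_cons_self) ha)

lemma foldl_ge {α : Type} (f : Int → α → Int) :
    ∀ (l : List α) (a : Int), (∀ a' x, a' ≤ f a' x) → a ≤ l.foldl f a := by
  intro l
  induction l with
  | nil => intro a _; simp
  | cons x xs ih => intro a h; exact le_trans (h a x) (ih _ h)

lemma dA_le_aux : ∀ (n : Nat) (t : List Char), t.length = n → 1 ≤ t.length →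
    dA t ≤ (t.length : Int) := by
  intro n
  induction n using Nat.strong_induction_on with
  | _ n ih =>
    intro t hn h1
    rw [dA_unfold]
    apply foldl_le _ _ _ _ ?_ (by exact_mod_cast h1)
    intro a k hk ha
    rw [List.mem_range'] at hk
    obtain ⟨j, hj, rfl⟩ := hk
    split_ifs with h
    · apply max_le ha
      have hd : (t.drop (1 + 1 * j)).length = t.length - (1 + 1 * j) := by simp
      have hrec := ih (t.length - (1 + 1 * j)) (by omega) (t.drop (1 + 1 * j)) hd
        (by rw [hd]; omega)
      rw [hd] at hrec
      have : ((t.length - (1 + 1 * j) : Nat) : Int) ≤ (t.length : Int) - 1 := by omega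
      omega
    · exact ha

lemma dA_le (t : List Char) (h1 : 1 ≤ t.length) : dA t ≤ (t.length : Int) :=
  dA_le_aux t.length t rfl h1

def repStep (n : Nat) (c : Char) (st : List Nat × Nat) (q : Nat) : List Nat × Nat :=
  let k := ptWhile (List.replicate n c) st.1 q n st.2
  let k := if (List.replicate n c).getD k ' ' = (List.replicate n c).getD q ' ' then k + 1 else k
  (st.1.set q k, k)

lemma pmt_replicate_eq (n : Nat) (c : Char) : pmt (List.replicate n c) =
    ((List.range' 1 (n - 1)).foldl (repStep n c) (List.replicate n 0, 0)).1 := by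
  simp only [pmt, List.length_replicate]
  rfl

lemma ptWhile_eq_of_eq (P : List Char) (pt : List Nat) (q fuel k : Nat)
    (h : P.getD k ' ' = P.getD q ' ') : ptWhile P pt q fuel k = k := by
  rw [List.getD_eq_getElem?_getD, List.getD_eq_getElem?_getD] at h
  cases fuel with
  | zero => rfl
  | succ fuel => simp [ptWhile, h]

lemma repStep_eval (n : Nat) (c : Char) (st : List Nat × Nat) (q : Nat)
    (hk : st.2 < n) (hq : q < n) :
    repStep n c st q = (st.1.set q (st.2 + 1), st.2 + 1) := by
  have hchars : ∀ i, i < n → (List.replicate n c).getD i ' ' = c := fun i hi =>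
    List.getD_replicate c hi
  show (st.1.set q (if (List.replicate n c).getD
        (ptWhile (List.replicate n c) st.1 q n st.2) ' ' = (List.replicate n c).getD q ' '
      then ptWhile (List.replicate n c) st.1 q n st.2 + 1
      else ptWhile (List.replicate n c) st.1 q n st.2), _) = _
  rw [ptWhile_eq_of_eq _ _ _ _ _ (by rw [hchars _ hk, hchars _ hq])]
  rw [if_pos (by rw [hchars _ hk, hchars _ hq])]

lemma pmt_rep_inv (n : Nat) (c : Char) (hn : 2 ≤ n) :
    ∀ j, 1 ≤ j → j ≤ n - 1 →
      let st := (List.range' 1 j).foldl (repStep n c) (List.replicate n 0, 0)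
      st.2 = j ∧ st.1.getD 1 0 = 1 ∧ st.1.length = n := by
  intro j
  induction j with
  | zero => omega
  | succ j ihj =>
    intro _ hj2
    by_cases hj : 1 ≤ j
    · have ih := ihj hj (by omega)
      rw [List.range'_concat, List.foldl_append]
      set st := (List.range' 1 j).foldl (repStep n c) (List.replicate n 0, 0) with hst
      obtain ⟨h2, hg, hl⟩ := ih
      simp only [List.foldl_cons, List.foldl_nil]
      rw [repStep_eval n c st (1 + 1 * j) (by omega) (by omega), h2]
      refine ⟨by omega, ?_, by simpa using hl⟩
      rw [List.getD_eq_getElem?_getD, List.getElem?_set_ne (by omega),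
        ← List.getD_eq_getElem?_getD, hg]
    · have hj0 : j = 0 := by omega
      subst hj0
      show ((List.range' 1 1).foldl (repStep n c) (List.replicate n 0, 0)).2 = 1 ∧ _ ∧ _
      have : List.range' 1 1 = [1] := rfl
      rw [this]
      simp only [List.foldl_cons, List.foldl_nil]
      rw [repStep_eval n c (List.replicate n 0, 0) 1 (by omega) (by omega)]
      refine ⟨rfl, ?_, by simp⟩
      rw [List.getD_eq_getElem?_getD]
      rw [List.getElem?_set_self (by simpa using hn)]
      rfl

lemma pmt_replicate_one (n : Nat) (c : Char) (hn : 2 ≤ n) :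
    (pmt (List.replicate n c)).getD 1 0 = 1 := by
  rw [pmt_replicate_eq]
  exact (pmt_rep_inv n c hn (n - 1) (by omega) (by omega)).2.1

lemma dA_nil : dA [] = 1 := by rw [dA_unfold]; rfl

lemma dA_replicate : ∀ (n : Nat) (c : Char), 1 ≤ n → dA (List.replicate n c) = (n : Int) := by
  intro n
  induction n with
  | zero => omega
  | succ n ihn =>
    intro c _
    by_cases hn : 1 ≤ n
    · refine le_antisymm (by simpa using dA_le (List.replicate (n + 1) c) (by simp)) ?_
      rw [dA_unfold]
      simp only [List.length_replicate]
      have h2 : (n + 1) / 2 = ((n + 1) / 2 - 1) + 1 := by omega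
      rw [h2, List.range'_succ]
      simp only [List.foldl_cons]
      refine le_trans ?_ (foldl_ge _ _ _ (fun a x => ?_))
      · rw [show 2 * 1 - 1 = 1 from rfl, if_pos (pmt_replicate_one (n + 1) c (by omega))]
        rw [List.drop_replicate]
        simp only [Nat.add_sub_cancel]
        rw [ihn c hn]
        refine le_trans ?_ (le_max_right 1 _)
        push_cast
        omega
      · dsimp only
        split_ifs
        · exact le_max_left _ _
        · exact le_rfl
    · have h0 : n = 0 := by omega
      subst h0
      rw [dA_unfold]
      simp

lemma B_inv (cs : List Char) :
    ∀ m, m ≤ cs.length →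
      (List.range' 1 m).foldl (fun (dp : List Int) m' =>
        let pt := pmt (cs.drop (cs.length - m'))
        let best := (List.range' 1 (m' / 2)).foldl
          (fun best k =>
            if pt.getD (2 * k - 1) 0 = k then max best (dp.getD (k - 1) 1 + 1) else best)
          (1 : Int)
        best :: dp) [1]
      = (List.range (m + 1)).map (fun j => dA (cs.drop (cs.length - (m - j)))) := by
  intro m
  induction m with
  | zero =>
    intro _
    rw [List.range'_zero, List.foldl_nil,
      show List.range 1 = [0] from rfl, List.map_cons, List.map_nil]
    simp [dA_nil]
  | succ m ihm =>
    intro hm1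
    rw [List.range'_concat, List.foldl_append, ihm (by omega)]
    simp only [List.foldl_cons, List.foldl_nil]
    have h11 : 1 + 1 * m = m + 1 := by omega
    rw [h11]
    have hlen : (List.drop (cs.length - (m + 1)) cs).length = m + 1 := by
      simp
      omega
    have hbest :
        List.foldl (fun best k =>
            if (pmt (List.drop (cs.length - (m + 1)) cs)).getD (2 * k - 1) 0 = k then
              max best
                (((List.range (m + 1)).map
                    (fun j => dA (List.drop (cs.length - (m - j)) cs))).getD (k - 1) 1 + 1)
            else best) 1 (List.range' 1 ((m + 1) / 2))
        = dA (List.drop (cs.length - (m + 1)) cs) := by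
      rw [dA_unfold, hlen]
      apply PySem.List.foldl_congr_mem
      intro b k hk
      rw [List.mem_range'] at hk
      obtain ⟨j, hj, rfl⟩ := hk
      by_cases h : (pmt (List.drop (cs.length - (m + 1)) cs)).getD (2 * (1 + 1 * j) - 1) 0
          = 1 + 1 * j
      · rw [if_pos h, if_pos h]
        have hget : ((List.range (m + 1)).map
            (fun j => dA (List.drop (cs.length - (m - j)) cs))).getD (1 + 1 * j - 1) 1
            = dA (List.drop (cs.length - (m - (1 + 1 * j - 1))) cs) := by
          rw [List.getD_eq_getElem?_getD, List.getElem?_map,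
            List.getElem?_range (by omega)]
          rfl
        rw [hget, List.drop_drop]
        have harg : cs.length - (m - (1 + 1 * j - 1)) = cs.length - (m + 1) + (1 + 1 * j) := by
          omega
        rw [harg]
      · rw [if_neg h, if_neg h]
    rw [hbest]
    conv_rhs => rw [List.range_succ_eq_map, List.map_cons, List.map_map]
    congr 1
    apply List.map_congr_left
    intro a _
    simp only [Function.comp_apply]
    congr 2
    omega

lemma alt_eq_dA (s : String) : deleteString2_alt s = dA s.toList := by
  unfold deleteString2_alt
  dsimp only
  rw [B_inv s.toList s.toList.length le_rfl]
  rw [List.getD_eq_getElem?_getD, List.getElem?_map, List.getElem?_range (by omega)]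
  simp

-- ===== VERDICT (by name: the statement is the Claim_ definition above) =====
theorem deleteString2_spec : Claim_equal_deleteString2 := by
  intro s _
  unfold Spec_deleteString2
  rw [alt_eq_dA]
  unfold deleteString2
  dsimp only
  split_ifs with h
  · obtain ⟨c, hc⟩ := List.length_eq_one_iff.mp h
    have hmem : ∀ x ∈ s.toList, x = c := by
      intro x hx
      have hx' : x ∈ PySem.Set.ofList s.toList := (PySem.Set.mem_ofList _ _).mpr hx
      rw [hc] at hx'
      simpa using hx'
    have hcmem : c ∈ s.toList := (PySem.Set.mem_ofList _ _).mp (by rw [hc]; simp)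
    have hrep : s.toList = List.replicate s.toList.length c :=
      List.eq_replicate_iff.mpr ⟨rfl, hmem⟩
    conv_rhs => rw [hrep]
    rw [dA_replicate _ c (List.length_pos_of_mem hcmem)]
  · rfl
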